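-- pv_equiv track=rewrite | github.com/jeffpar/argument-aloud | scripts/import_ussc.py | _speakers_subset
-- ===== SOURCE A (Python) =====
-- def _title_is_female(title: str) -> bool:
--     """Return True when the title signals a female advocate (MS./MRS./MISS)."""
--     return 'MS.' in title or 'MRS.' in title or 'MISS' in title
--
-- def _speakers_subset(
--         ussc_spk: frozenset[tuple[str, str]],
--         oyez_spk: frozenset[tuple[str, str]],
-- ) -> bool:
--     """Return True when every ussc speaker has a gender-compatible match in oyez.
--
--     Two entries for the same name are gender-compatible when they agree on
--     whether the speaker is female (title contains MS./MRS./MISS).  MR. and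
--     no title are both treated as male/neutral and therefore match each other.
--     """
--     oyez_by_name: dict[str, list[str]] = {}
--     for name, title in oyez_spk:
--         oyez_by_name.setdefault(name, []).append(title)
--     for name, title in ussc_spk:
--         candidates = oyez_by_name.get(name)
--         if not candidates:
--             return False
--         ussc_female = _title_is_female(title)
--         if not any(_title_is_female(t) == ussc_female for t in candidates):
--             return False
--     return True
-- ===== SOURCE B (Python) =====
-- def _title_is_female(title: str) -> bool:
--     """Return True when the title signals a female advocate (MS./MRS./MISS)."""
--     return 'MS.' in title or 'MRS.' in title or 'MISS' in title
--
-- def _speakers_subset(ussc_spk, oyez_spk) -> bool: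
--     """Canonicalize to (name, is_female) pairs and test set inclusion."""
--     oyez_canon = {(name, _title_is_female(title)) for name, title in oyez_spk}
--     return all((name, _title_is_female(title)) in oyez_canon
--                for name, title in ussc_spk)
-- ===== Notes on version B (the rewrite author's own statement) =====
-- stated objective: idiomatic
-- what changed: Replaces the name->list-of-titles dict plus an inner any()-scan over candidate titles with a flat set of canonical (name, is_female) pairs and a single membership test per ussc speaker.
import Mathlib
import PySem

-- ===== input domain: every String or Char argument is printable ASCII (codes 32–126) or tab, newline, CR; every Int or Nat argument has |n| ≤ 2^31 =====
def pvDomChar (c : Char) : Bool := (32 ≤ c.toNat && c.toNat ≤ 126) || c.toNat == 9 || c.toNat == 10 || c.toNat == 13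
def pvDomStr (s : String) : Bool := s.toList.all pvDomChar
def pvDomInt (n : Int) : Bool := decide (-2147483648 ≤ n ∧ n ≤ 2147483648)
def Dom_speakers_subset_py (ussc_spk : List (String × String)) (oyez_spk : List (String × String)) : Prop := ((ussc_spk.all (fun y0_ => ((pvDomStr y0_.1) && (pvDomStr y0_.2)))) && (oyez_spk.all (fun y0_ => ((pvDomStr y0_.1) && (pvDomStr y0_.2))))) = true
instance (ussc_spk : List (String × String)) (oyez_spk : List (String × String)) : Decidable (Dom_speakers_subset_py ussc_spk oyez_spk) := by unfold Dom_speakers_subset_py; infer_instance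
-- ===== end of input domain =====

-- B folds the gender bit into the lookup key: a flat set of (name, is_female) pairs
-- with one membership test per ussc speaker, instead of A's name→titles dict with an
-- inner any()-scan over candidate titles (objective: idiomatic).

-- ===== PORT A =====
-- 'MS.' in title or 'MRS.' in title or 'MISS' in title
def titleIsFemale (title : String) : Bool :=
  PySem.Str.isIn "MS." title || PySem.Str.isIn "MRS." title || PySem.Str.isIn "MISS" title

-- oyez_by_name.setdefault(name, []).append(title): overwrite-in-place / append-new semantics of PySem.Dict.insert
def buildOyezByName (oyez_spk : List (String × String)) : PySem.Dict String (List String) :=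
  oyez_spk.foldl (fun d p => d.insert p.1 (d.getD p.1 [] ++ [p.2])) PySem.Dict.empty

-- the second for-loop with its early returns
def usscLoop (d : PySem.Dict String (List String)) : List (String × String) → Bool
  | [] => true
  | (name, title) :: rest =>
    match d.get? name with
    | none => false
    | some candidates =>
      if candidates.isEmpty then false
      else if candidates.any (fun t => titleIsFemale t == titleIsFemale title) then
        usscLoop d rest
      else false

def speakers_subset_py (ussc_spk : List (String × String)) (oyez_spk : List (String × String)) : Bool :=
  usscLoop (buildOyezByName oyez_spk) ussc_spk

-- ===== PORT B =====
def speakers_subset_py_alt (ussc_spk : List (String × String)) (oyez_spk : List (String × String)) : Bool :=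
  let oyez_canon := PySem.Set.ofList (oyez_spk.map (fun p => (p.1, titleIsFemale p.2)))
  ussc_spk.all (fun p => PySem.Set.contains oyez_canon (p.1, titleIsFemale p.2))

-- ===== PRECONDITION & SPEC =====
def Spec_speakers_subset_py (ussc_spk : List (String × String)) (oyez_spk : List (String × String)) (out : Bool) : Prop := out = speakers_subset_py_alt ussc_spk oyez_spk
instance (ussc_spk : List (String × String)) (oyez_spk : List (String × String)) (out : Bool) : Decidable (Spec_speakers_subset_py ussc_spk oyez_spk out) := by unfold Spec_speakers_subset_py; infer_instance

-- ===== CLAIM (what is proved, stated in full; the proofs are below) =====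
def Claim_equal_speakers_subset_py : Prop := ∀ (ussc_spk : List (String × String)) (oyez_spk : List (String × String)), Dom_speakers_subset_py ussc_spk oyez_spk → Spec_speakers_subset_py ussc_spk oyez_spk (speakers_subset_py ussc_spk oyez_spk)

-- ===== LEMMAS AND PROOFS =====

-- A's per-speaker check against the built dict, as a function
def checkA (d : PySem.Dict String (List String)) (name : String) (f : Bool) : Bool :=
  match d.get? name with
  | none => false
  | some candidates =>
    !candidates.isEmpty && candidates.any (fun t => titleIsFemale t == f)

theorem usscLoop_eq_all (d : PySem.Dict String (List String)) (l : List (String × String)) :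
    usscLoop d l = l.all (fun p => checkA d p.1 (titleIsFemale p.2)) := by
  induction l with
  | nil => rfl
  | cons p rest ih =>
    obtain ⟨name, title⟩ := p
    simp only [usscLoop, List.all_cons]
    cases h : d.get? name with
    | none => simp [checkA, h]
    | some c =>
      have hd : checkA d name (titleIsFemale title)
          = (!c.isEmpty && c.any (fun t => titleIsFemale t == titleIsFemale title)) := by
        simp [checkA, h]
      cases hc : c.isEmpty
      · cases ha : c.any (fun t => titleIsFemale t == titleIsFemale title)
        · simp only [hd, hc, ha]; simp
        · simp only [hd, hc, ha]; simpa using ih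
      · simp only [hd, hc]; simp

-- the dict check equals a direct scan of oyez_spk
theorem checkA_build (oyez : List (String × String)) (name : String) (f : Bool) :
    checkA (buildOyezByName oyez) name f
      = oyez.any (fun q => q.1 == name && (titleIsFemale q.2 == f)) := by
  induction oyez using List.reverseRecOn with
  | nil => rfl
  | append_singleton l p ih =>
    have hb : buildOyezByName (l ++ [p])
        = (buildOyezByName l).insert p.1 ((buildOyezByName l).getD p.1 [] ++ [p.2]) := by
      simp [buildOyezByName, List.foldl_append]
    rw [List.any_append, ← ih]
    simp only [checkA, hb]
    by_cases hn : p.1 = name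
    · subst hn
      rw [PySem.Dict.get?_insert_self]
      rw [PySem.Dict.getD_eq_get?_getD]
      cases h : (buildOyezByName l).get? p.1 with
      | none => simp [List.any_cons]
      | some c =>
        simp only [Option.getD_some]
        cases c with
        | nil => simp [List.any_cons]
        | cons a t =>
          simp [List.any_append, List.any_cons, Bool.or_assoc]
    · have hne : name ≠ p.1 := fun h => hn h.symm
      rw [PySem.Dict.get?_insert_of_ne _ _ hne]
      have hp : (p.1 == name) = false := by simp [hn]
      simp [List.any_cons, hp]

-- B's per-speaker check equals the same direct scan
theorem checkB_eq_any (oyez : List (String × String)) (name : String) (f : Bool) :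
    PySem.Set.contains (PySem.Set.ofList (oyez.map (fun p => (p.1, titleIsFemale p.2)))) (name, f)
      = oyez.any (fun q => q.1 == name && (titleIsFemale q.2 == f)) := by
  have h1 : PySem.Set.contains (PySem.Set.ofList (oyez.map (fun p => (p.1, titleIsFemale p.2)))) (name, f) = true
      ↔ (name, f) ∈ oyez.map (fun p => (p.1, titleIsFemale p.2)) := by
    rw [PySem.Set.contains_iff, PySem.Set.mem_ofList]
  have h2 : (oyez.any (fun q => q.1 == name && (titleIsFemale q.2 == f)) = true)
      ↔ (name, f) ∈ oyez.map (fun p => (p.1, titleIsFemale p.2)) := by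
    simp only [List.any_eq_true, List.mem_map, Prod.ext_iff, beq_iff_eq, Bool.and_eq_true]
  by_cases hm : (name, f) ∈ oyez.map (fun p => (p.1, titleIsFemale p.2))
  · rw [h1.mpr hm, h2.mpr hm]
  · rw [Bool.eq_false_iff.mpr (fun hx => hm (h1.mp hx)),
        Bool.eq_false_iff.mpr (fun hx => hm (h2.mp hx))]

-- ===== VERDICT (by name: the statement is the Claim_ definition above) =====
theorem speakers_subset_py_spec : Claim_equal_speakers_subset_py := by
  intro ussc oyez _
  show usscLoop (buildOyezByName oyez) ussc
      = ussc.all (fun p =>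
          PySem.Set.contains
            (PySem.Set.ofList (oyez.map (fun p => (p.1, titleIsFemale p.2))))
            (p.1, titleIsFemale p.2))
  have hfun : (fun p : String × String => checkA (buildOyezByName oyez) p.1 (titleIsFemale p.2))
      = (fun p : String × String =>
          PySem.Set.contains
            (PySem.Set.ofList (oyez.map (fun p => (p.1, titleIsFemale p.2))))
            (p.1, titleIsFemale p.2)) := by
    funext p
    rw [checkA_build, checkB_eq_any]
  rw [usscLoop_eq_all, hfun]
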